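-- pv_equiv track=rewrite | github.com/emmerhuang/mindfork-office | scripts/build-sprite-atlas.py | build_frame_list
-- ===== SOURCE A (Python) =====
-- DIRS = ["south", "east", "north", "west"]
--
-- WALK_FRAMES = 4
--
-- CELEBRATE_FRAME_COUNTS = {
--     "boss": 4, "secretary": 4, "sherlock": 4, "lego": 4,
--     "vault": 4, "forge": 4, "lens": 4, "waffles": 4,
--     "mika": 7, "yuki": 7, "grant": 4,
-- }
--
-- def build_frame_list(char_id: str) -> list[dict]:
--     """Build ordered list of frames with their source filenames and atlas keys."""
--     frames = []
--
--     # Idle: 4 directions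
--     for d in DIRS:
--         frames.append({
--             "key": f"v2-{char_id}-{d}",
--             "file": f"{d}.png",
--         })
--
--     # Walk: 4 directions x 4 frames
--     for d in DIRS:
--         for f in range(WALK_FRAMES):
--             frames.append({
--                 "key": f"v2-{char_id}-walk-{d}-{f}",
--                 "file": f"walk-{d}-{f}.png",
--             })
--
--     # Celebrate: south only
--     cel_count = CELEBRATE_FRAME_COUNTS.get(char_id, 4)
--     for f in range(cel_count):
--         frames.append({
--             "key": f"v2-{char_id}-celebrate-south-{f}",
--             "file": f"celebrate-south-{f}.png",
--         })
--
--     # Waffles excited: 4 directions x 4 frames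
--     if char_id == "waffles":
--         for d in DIRS:
--             for f in range(4):
--                 frames.append({
--                     "key": f"v2-waffles-excited-{d}-{f}",
--                     "file": f"excited-{d}-{f}.png",
--                 })
--
--     return frames
-- ===== SOURCE B (Python) =====
-- DIRS = ["south", "east", "north", "west"]
--
-- WALK_FRAMES = 4
--
-- CELEBRATE_FRAME_COUNTS = {
--     "boss": 4, "secretary": 4, "sherlock": 4, "lego": 4,
--     "vault": 4, "forge": 4, "lens": 4, "waffles": 4,
--     "mika": 7, "yuki": 7, "grant": 4,
-- }
--
-- def build_frame_list(char_id: str) -> list[dict]: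
--     """Build ordered list of frames with their source filenames and atlas keys."""
--     cel = CELEBRATE_FRAME_COUNTS.get(char_id, 4)
--     total = 4 + 4 * WALK_FRAMES + cel + (16 if char_id == "waffles" else 0)
--
--     def frame(i: int) -> dict:
--         # decode the global index i into (section, direction, frame number)
--         if i < 4:
--             d = DIRS[i]
--             return {"key": f"v2-{char_id}-{d}", "file": f"{d}.png"}
--         if i < 20:
--             action, d, f = "walk", DIRS[(i - 4) // 4], (i - 4) % 4
--         elif i < 20 + cel:
--             action, d, f = "celebrate", "south", i - 20
--         else:
--             action, d, f = "excited", DIRS[(i - 20 - cel) // 4], (i - 20 - cel) % 4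
--         return {"key": f"v2-{char_id}-{action}-{d}-{f}",
--                 "file": f"{action}-{d}-{f}.png"}
--
--     return [frame(i) for i in range(total)]
-- ===== Notes on version B (the rewrite author's own statement) =====
-- stated objective: alternative
-- what changed: B computes the total frame count in closed form and builds the list in one map over range(total), arithmetically decoding each global index into its (section, direction, frame) via comparisons, // and %, instead of A's four staged append loops.
import Mathlib
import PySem

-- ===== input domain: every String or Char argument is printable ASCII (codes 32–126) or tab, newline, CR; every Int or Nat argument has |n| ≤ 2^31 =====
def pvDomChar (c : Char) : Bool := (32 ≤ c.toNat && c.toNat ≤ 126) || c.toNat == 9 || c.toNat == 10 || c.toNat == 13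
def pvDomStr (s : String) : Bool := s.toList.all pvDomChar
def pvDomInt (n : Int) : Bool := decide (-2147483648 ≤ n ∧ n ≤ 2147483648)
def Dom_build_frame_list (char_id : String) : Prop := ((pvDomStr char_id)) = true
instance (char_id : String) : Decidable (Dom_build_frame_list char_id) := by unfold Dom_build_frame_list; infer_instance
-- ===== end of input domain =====

-- B replaces A's four staged append loops by a closed-form total count and a single map that
-- arithmetically decodes each global index into its (section, direction, frame); same return value.

-- ===== PORT A =====
def DIRS : List String := ["south", "east", "north", "west"]

def WALK_FRAMES : Int := 4

def CELEBRATE_FRAME_COUNTS : PySem.Dict String Int :=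
  PySem.Dict.ofList [("boss", 4), ("secretary", 4), ("sherlock", 4), ("lego", 4),
    ("vault", 4), ("forge", 4), ("lens", 4), ("waffles", 4),
    ("mika", 7), ("yuki", 7), ("grant", 4)]

def build_frame_list (char_id : String) : List (List (String × String)) :=
  -- frames = []
  let frames : List (List (String × String)) := []
  -- Idle: 4 directions
  let frames := DIRS.foldl (fun acc d =>
    acc ++ [[("key", "v2-" ++ char_id ++ "-" ++ d), ("file", d ++ ".png")]]) frames
  -- Walk: 4 directions x WALK_FRAMES frames
  let frames := DIRS.foldl (fun acc d =>
    (PySem.List.pyRange 0 WALK_FRAMES 1).foldl (fun acc f =>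
      acc ++ [[("key", "v2-" ++ char_id ++ "-walk-" ++ d ++ "-" ++ PySem.Int.toStr f),
               ("file", "walk-" ++ d ++ "-" ++ PySem.Int.toStr f ++ ".png")]]) acc) frames
  -- Celebrate: south only
  let cel_count := CELEBRATE_FRAME_COUNTS.getD char_id 4
  let frames := (PySem.List.pyRange 0 cel_count 1).foldl (fun acc f =>
    acc ++ [[("key", "v2-" ++ char_id ++ "-celebrate-south-" ++ PySem.Int.toStr f),
             ("file", "celebrate-south-" ++ PySem.Int.toStr f ++ ".png")]]) frames
  -- Waffles excited: 4 directions x 4 frames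
  let frames := if char_id == "waffles" then
    DIRS.foldl (fun acc d =>
      (PySem.List.pyRange 0 4 1).foldl (fun acc f =>
        acc ++ [[("key", "v2-waffles-excited-" ++ d ++ "-" ++ PySem.Int.toStr f),
                 ("file", "excited-" ++ d ++ "-" ++ PySem.Int.toStr f ++ ".png")]]) acc) frames
    else frames
  frames

-- ===== PORT B =====
-- the inner 'frame' closure of Source B (char_id and cel are its captured variables);
-- '.getD ""' only totalises DIRS[...] — the index is always in range when called from build_frame_list_alt
def bflFrame (char_id : String) (cel : Int) (i : Int) : List (String × String) :=
  if i < 4 then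
    let d := (PySem.List.pyGet? DIRS i).getD ""
    [("key", "v2-" ++ char_id ++ "-" ++ d), ("file", d ++ ".png")]
  else
    let adf : String × String × Int :=
      if i < 20 then
        ("walk", (PySem.List.pyGet? DIRS (PySem.Int.floordiv (i - 4) 4)).getD "", PySem.Int.mod (i - 4) 4)
      else if i < 20 + cel then
        ("celebrate", "south", i - 20)
      else
        ("excited", (PySem.List.pyGet? DIRS (PySem.Int.floordiv (i - 20 - cel) 4)).getD "", PySem.Int.mod (i - 20 - cel) 4)
    let action := adf.1; let d := adf.2.1; let f := adf.2.2
    [("key", "v2-" ++ char_id ++ "-" ++ action ++ "-" ++ d ++ "-" ++ PySem.Int.toStr f),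
     ("file", action ++ "-" ++ d ++ "-" ++ PySem.Int.toStr f ++ ".png")]

def build_frame_list_alt (char_id : String) : List (List (String × String)) :=
  let cel := CELEBRATE_FRAME_COUNTS.getD char_id 4
  let total := 4 + 4 * WALK_FRAMES + cel + (if char_id == "waffles" then 16 else 0)
  (PySem.List.pyRange 0 total 1).map (bflFrame char_id cel)

-- ===== PRECONDITION & SPEC =====
def Spec_build_frame_list (char_id : String) (out : List (List (String × String))) : Prop := out = build_frame_list_alt char_id
instance (char_id : String) (out : List (List (String × String))) : Decidable (Spec_build_frame_list char_id out) := by unfold Spec_build_frame_list; infer_instance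

-- ===== CLAIM (what is proved, stated in full; the proofs are below) =====
def Claim_equal_build_frame_list : Prop := ∀ (char_id : String), Dom_build_frame_list char_id → Spec_build_frame_list char_id (build_frame_list char_id)

-- ===== LEMMAS AND PROOFS =====

theorem cel_count_eq (char_id : String) :
    CELEBRATE_FRAME_COUNTS.getD char_id 4 =
      (if char_id = "mika" ∨ char_id = "yuki" then 7 else 4) := by
  simp only [CELEBRATE_FRAME_COUNTS, PySem.Dict.ofList, PySem.Dict.update, List.foldl,
    PySem.Dict.getD_insert, PySem.Dict.getD_empty]
  split_ifs <;> simp_all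

theorem build_frame_list_spec' (char_id : String) :
    build_frame_list char_id = build_frame_list_alt char_id := by
  unfold build_frame_list build_frame_list_alt
  rw [cel_count_eq]
  by_cases hw : char_id = "waffles"
  · subst hw; decide
  · by_cases hm : char_id = "mika"
    · subst hm; decide
    · by_cases hy : char_id = "yuki"
      · subst hy; decide
      · have hw' : (char_id == "waffles") = false := by simp [hw]
        simp only [hm, hy, or_self, if_false, hw']
        simp [DIRS, WALK_FRAMES, bflFrame, PySem.List.pyRange, List.range_succ,
          PySem.List.pyGet?, PySem.List.pyIdx?, PySem.Int.floordiv, PySem.Int.mod,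
          PySem.Int.toStr, String.append_assoc]
        decide

-- ===== VERDICT (by name: the statement is the Claim_ definition above) =====
theorem build_frame_list_spec : Claim_equal_build_frame_list := by
  intro char_id _
  exact build_frame_list_spec' char_id
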